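-- pv_equiv track=rewrite | github.com/ParthivDataScientist/Insta-SCM | app/services/dhl_status.py | map_dhl_status
-- ===== SOURCE A (Python) =====
-- from typing import Optional
--
-- DHL_STATUS_MAP = {
--     "delivered": "Delivered",
--     "delivery successful": "Delivered",
--     "shipment delivered": "Delivered",
--     "delivered - signed for": "Delivered",
--     "proof of delivery": "Delivered",
--     "transit": "In Transit",
--     "in transit": "In Transit",
--     "departed": "In Transit",
--     "arrived": "In Transit",
--     "processed": "In Transit",
--     "sorted": "In Transit",
--     "picked up": "In Transit",
--     "shipment picked up": "In Transit",
--     "customs update": "In Transit",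
--     "customs clearance status updated": "In Transit",
--     "customs cleared": "In Transit",
--     "out for delivery": "Out for Delivery",
--     "with delivery courier": "Out for Delivery",
--     "with courier": "Out for Delivery",
--     "exception": "Exception",
--     "held": "Exception",
--     "customs hold": "Exception",
--     "held at customs": "Exception",
--     "customs delay": "Exception",
--     "delay": "Exception",
--     "returned": "Exception",
--     "undeliver": "Exception",
--     "attempted": "Exception",
-- }
--
-- def map_dhl_status(status_str: str, event_code: Optional[str] = None) -> str:
--     lower = str(status_str or "").lower().strip()
--     code = str(event_code or "").upper().strip()
--
--     if code == "WC":
--         return "Out for Delivery"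
--     if code == "OK":
--         return "Delivered"
--
--     if lower in DHL_STATUS_MAP:
--         return DHL_STATUS_MAP[lower]
--
--     for key in sorted(DHL_STATUS_MAP, key=len, reverse=True):
--         if key in lower:
--             return DHL_STATUS_MAP[key]
--
--     delivered_markers = (
--         "shipment delivered",
--         "delivery successful",
--         "delivered - signed for",
--         "proof of delivery",
--         "delivered",
--     )
--     if any(marker in lower for marker in delivered_markers):
--         if not any(token in lower for token in ("delivery facility", "out for delivery", "scheduled for delivery", "attempted")):
--             return "Delivered"
--
--     return "In Transit"
-- ===== SOURCE B (Python) =====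
-- from typing import Optional
--
-- DHL_STATUS_MAP = {
--     "delivered": "Delivered",
--     "delivery successful": "Delivered",
--     "shipment delivered": "Delivered",
--     "delivered - signed for": "Delivered",
--     "proof of delivery": "Delivered",
--     "transit": "In Transit",
--     "in transit": "In Transit",
--     "departed": "In Transit",
--     "arrived": "In Transit",
--     "processed": "In Transit",
--     "sorted": "In Transit",
--     "picked up": "In Transit",
--     "shipment picked up": "In Transit",
--     "customs update": "In Transit",
--     "customs clearance status updated": "In Transit",
--     "customs cleared": "In Transit",
--     "out for delivery": "Out for Delivery",
--     "with delivery courier": "Out for Delivery",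
--     "with courier": "Out for Delivery",
--     "exception": "Exception",
--     "held": "Exception",
--     "customs hold": "Exception",
--     "held at customs": "Exception",
--     "customs delay": "Exception",
--     "delay": "Exception",
--     "returned": "Exception",
--     "undeliver": "Exception",
--     "attempted": "Exception",
-- }
--
-- def map_dhl_status(status_str: str, event_code: Optional[str] = None) -> str:
--     lower = str(status_str or "").lower().strip()
--     code = str(event_code or "").upper().strip()
--
--     if code == "WC":
--         return "Out for Delivery"
--     if code == "OK":
--         return "Delivered"
--
--     if lower in DHL_STATUS_MAP:
--         return DHL_STATUS_MAP[lower]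
--
--     # single linear scan keeping the longest matching key (earliest wins ties),
--     # instead of sorting all keys by length on every call
--     best = None
--     for key, val in DHL_STATUS_MAP.items():
--         if key in lower and (best is None or len(key) > len(best[0])):
--             best = (key, val)
--     if best is not None:
--         return best[1]
--
--     # every delivered-marker is itself a key, so no separate fallback is needed
--     return "In Transit"
-- ===== Notes on version B (the rewrite author's own statement) =====
-- stated objective: simpler
-- what changed: Replaces the per-call sort of all keys plus first-match loop by a single linear scan that keeps the longest matching key (strict > so the earliest key wins length ties, matching the stable sort), and drops the delivered_markers fallback, which is dead code because every marker is itself a key.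
import Mathlib
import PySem

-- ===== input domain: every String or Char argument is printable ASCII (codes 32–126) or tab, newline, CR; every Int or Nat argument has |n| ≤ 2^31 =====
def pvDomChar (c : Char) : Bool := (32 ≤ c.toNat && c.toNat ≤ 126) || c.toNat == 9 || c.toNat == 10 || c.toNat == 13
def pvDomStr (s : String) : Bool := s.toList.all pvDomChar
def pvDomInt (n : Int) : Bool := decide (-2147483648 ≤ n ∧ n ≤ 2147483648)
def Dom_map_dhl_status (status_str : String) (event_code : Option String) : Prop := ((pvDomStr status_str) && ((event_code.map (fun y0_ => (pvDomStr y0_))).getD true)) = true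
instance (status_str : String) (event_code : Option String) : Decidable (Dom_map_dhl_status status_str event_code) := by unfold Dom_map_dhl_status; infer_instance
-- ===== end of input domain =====

-- B replaces A's per-call length-descending key sort + first-match loop by one linear scan
-- keeping the longest matching key (earliest wins ties) and drops A's dead marker fallback;
-- objective: simpler.

-- shared module constant: the literal DHL_STATUS_MAP (distinct keys, insertion order)
def dhlPairs : List (String × String) :=
  [("delivered", "Delivered"), ("delivery successful", "Delivered"),
   ("shipment delivered", "Delivered"), ("delivered - signed for", "Delivered"),
   ("proof of delivery", "Delivered"), ("transit", "In Transit"), ("in transit", "In Transit"),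
   ("departed", "In Transit"), ("arrived", "In Transit"), ("processed", "In Transit"),
   ("sorted", "In Transit"), ("picked up", "In Transit"), ("shipment picked up", "In Transit"),
   ("customs update", "In Transit"), ("customs clearance status updated", "In Transit"),
   ("customs cleared", "In Transit"), ("out for delivery", "Out for Delivery"),
   ("with delivery courier", "Out for Delivery"), ("with courier", "Out for Delivery"),
   ("exception", "Exception"), ("held", "Exception"), ("customs hold", "Exception"),
   ("held at customs", "Exception"), ("customs delay", "Exception"), ("delay", "Exception"),
   ("returned", "Exception"), ("undeliver", "Exception"), ("attempted", "Exception")]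

def dhlMap : PySem.Dict String String := PySem.Dict.mk dhlPairs

-- ===== PORT A =====
-- `for key in sorted(DHL_STATUS_MAP, key=len, reverse=True): if key in lower: return DHL_STATUS_MAP[key]`;
-- DHL_STATUS_MAP[key] is total here (key is drawn from the dict), so getD's default is never used
def dhlSortedLoop : List String → String → Option String
  | [], _ => none
  | k :: ks, lower =>
      if PySem.Str.isIn k lower then some (dhlMap.getD k "") else dhlSortedLoop ks lower

def dhlDeliveredMarkers : List String :=
  ["shipment delivered", "delivery successful", "delivered - signed for",
   "proof of delivery", "delivered"]

def dhlNegTokens : List String :=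
  ["delivery facility", "out for delivery", "scheduled for delivery", "attempted"]

def map_dhl_status (status_str : String) (event_code : Option String) : String :=
  -- `str(status_str or "")` is status_str itself for a str argument ("" or "" == "")
  let lower := PySem.Str.strip (PySem.Str.lower status_str)
  let code := PySem.Str.strip (PySem.Str.upper (event_code.getD ""))
  if code = "WC" then "Out for Delivery"
  else if code = "OK" then "Delivered"
  else if dhlMap.contains lower then dhlMap.getD lower ""
  else
    match dhlSortedLoop (PySem.List.sorted dhlMap.keys (fun k => PySem.Str.len k) true) lower with
    | some v => v
    | none =>
        if dhlDeliveredMarkers.any (fun m => PySem.Str.isIn m lower) then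
          if !(dhlNegTokens.any (fun t => PySem.Str.isIn t lower)) then "Delivered"
          else "In Transit"
        else "In Transit"

-- ===== PORT B =====
-- `best is None or len(key) > len(best[0])`
def dhlBeats (best : Option (String × String)) (k : String) : Bool :=
  match best with
  | none => true
  | some b => decide (PySem.Str.len b.1 < PySem.Str.len k)

-- `for key, val in DHL_STATUS_MAP.items(): if key in lower and (best is None or len(key) > len(best[0])): best = (key, val)`
def dhlBestLoop : List (String × String) → String → Option (String × String) → Option (String × String)
  | [], _, best => best
  | kv :: rest, lower, best =>
      dhlBestLoop rest lower
        (if PySem.Str.isIn kv.1 lower && dhlBeats best kv.1 then some kv else best)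

def map_dhl_status_alt (status_str : String) (event_code : Option String) : String :=
  let lower := PySem.Str.strip (PySem.Str.lower status_str)
  let code := PySem.Str.strip (PySem.Str.upper (event_code.getD ""))
  if code = "WC" then "Out for Delivery"
  else if code = "OK" then "Delivered"
  else if dhlMap.contains lower then dhlMap.getD lower ""
  else
    match dhlBestLoop dhlMap.items lower none with
    | some b => b.2
    | none => "In Transit"

-- ===== PRECONDITION & SPEC =====
def Spec_map_dhl_status (status_str : String) (event_code : Option String) (out : String) : Prop := out = map_dhl_status_alt status_str event_code
instance (status_str : String) (event_code : Option String) (out : String) : Decidable (Spec_map_dhl_status status_str event_code out) := by unfold Spec_map_dhl_status; infer_instance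

-- ===== CLAIM (what is proved, stated in full; the proofs are below) =====
def Claim_equal_map_dhl_status : Prop := ∀ (status_str : String) (event_code : Option String), Dom_map_dhl_status status_str event_code → Spec_map_dhl_status status_str event_code (map_dhl_status status_str event_code)

-- ===== LEMMAS AND PROOFS =====

-- the insertion index of a key in the dict, and the strict order "longer, or same length and inserted earlier"
def dhlIdx (k : String) : Nat := (dhlPairs.map Prod.fst).idxOf k

abbrev dhlLt (a b : String) : Prop :=
  PySem.Str.len b < PySem.Str.len a ∨
    (PySem.Str.len a = PySem.Str.len b ∧ dhlIdx a < dhlIdx b)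

-- the concrete sorted key list A iterates (stable sort, length descending)
def dhlSortedKeys : List String :=
  ["customs clearance status updated", "delivered - signed for", "with delivery courier",
   "delivery successful", "shipment delivered", "shipment picked up", "proof of delivery",
   "out for delivery", "customs cleared", "held at customs", "customs update", "customs delay",
   "with courier", "customs hold", "in transit", "delivered", "processed", "picked up",
   "exception", "undeliver", "attempted", "departed", "returned", "transit", "arrived",
   "sorted", "delay", "held"]

theorem dhl_sort_eq :
    PySem.List.sorted dhlMap.keys (fun k => PySem.Str.len k) true = dhlSortedKeys := by decide

theorem dhl_sorted_pairwise : dhlSortedKeys.Pairwise dhlLt := by decide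

theorem dhl_sorted_perm : dhlSortedKeys.Perm (dhlPairs.map Prod.fst) := by decide

theorem dhl_keys_nodup : dhlMap.keys.Nodup := by decide

theorem dhl_pairs_pairwise_idx :
    dhlPairs.Pairwise (fun x y => dhlIdx x.1 < dhlIdx y.1) := by decide

theorem dhlSortedLoop_eq_find (s : List String) (lower : String) :
    dhlSortedLoop s lower =
      (s.find? (fun k => PySem.Str.isIn k lower)).map (fun k => dhlMap.getD k "") := by
  induction s with
  | nil => rfl
  | cons k ks ih =>
      rw [dhlSortedLoop, List.find?_cons]
      cases hp : PySem.Str.isIn k lower <;> simp [ih]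

-- the first match of a dhlLt-sorted list is the dhlLt-least match
theorem find_sorted_min (p : String → Bool) :
    ∀ (s : List String), s.Pairwise dhlLt → ∀ k, s.find? p = some k →
      p k = true ∧ k ∈ s ∧ ∀ b ∈ s, p b = true → b = k ∨ dhlLt k b := by
  intro s
  induction s with
  | nil => intro _ k h; simp at h
  | cons h t ih =>
      intro hpw k hfind
      rcases List.pairwise_cons.mp hpw with ⟨hhd, htl⟩
      rw [List.find?_cons] at hfind
      cases hp : p h with
      | true =>
          rw [hp] at hfind
          injection hfind with hk
          subst hk
          refine ⟨hp, List.mem_cons_self, ?_⟩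
          intro b hb _
          rcases List.mem_cons.mp hb with rfl | hb'
          · exact Or.inl rfl
          · exact Or.inr (hhd b hb')
      | false =>
          rw [hp] at hfind
          rcases ih htl k hfind with ⟨h1, h2, h3⟩
          refine ⟨h1, List.mem_cons_of_mem _ h2, ?_⟩
          intro b hb hpb
          rcases List.mem_cons.mp hb with rfl | hb'
          · rw [hp] at hpb; exact absurd hpb (by simp)
          · exact h3 b hb' hpb

-- scanning cannot replace an accumulator at least as long as every match
theorem bestLoop_keep (lower : String) :
    ∀ (l : List (String × String)) (c : String × String),
      (∀ b ∈ l, PySem.Str.isIn b.1 lower = true → PySem.Str.len b.1 ≤ PySem.Str.len c.1) →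
      dhlBestLoop l lower (some c) = some c := by
  intro l
  induction l with
  | nil => intro c _; rfl
  | cons x t ih =>
      intro c hc
      have hx := hc x List.mem_cons_self
      rw [dhlBestLoop, if_neg]
      · exact ih c (fun b hb => hc b (List.mem_cons_of_mem _ hb))
      · simp only [Bool.and_eq_true, dhlBeats, decide_eq_true_eq]
        rintro ⟨hin, hlt⟩
        exact absurd hlt (by have := hx hin; omega)

theorem bestLoop_none (lower : String) :
    ∀ (l : List (String × String)) (acc : Option (String × String)),
      (∀ b ∈ l, PySem.Str.isIn b.1 lower = false) →
      dhlBestLoop l lower acc = acc := by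
  intro l
  induction l with
  | nil => intro acc _; rfl
  | cons x t ih =>
      intro acc h
      have hx := h x List.mem_cons_self
      rw [dhlBestLoop, if_neg (by simp only [hx, Bool.false_and]; exact Bool.false_ne_true)]
      exact ih acc (fun b hb => h b (List.mem_cons_of_mem _ hb))

-- the scan returns the dhlLt-least match
theorem bestLoop_min (lower : String) :
    ∀ (l : List (String × String)) (acc : Option (String × String)) (a : String × String),
      l.Pairwise (fun x y => dhlIdx x.1 < dhlIdx y.1) →
      a ∈ l → PySem.Str.isIn a.1 lower = true →
      (∀ b ∈ l, PySem.Str.isIn b.1 lower = true → b = a ∨ dhlLt a.1 b.1) →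
      (∀ c, acc = some c → PySem.Str.len c.1 < PySem.Str.len a.1) →
      dhlBestLoop l lower acc = some a := by
  intro l
  induction l with
  | nil => intro acc a _ h; simp at h
  | cons x t ih =>
      intro acc a hpw hmem hin hmin hacc
      rcases List.pairwise_cons.mp hpw with ⟨hhd, htl⟩
      rcases List.mem_cons.mp hmem with rfl | hat
      · -- head is the winner: it replaces acc, then survives the tail
        have hna : a ∉ t := fun h => absurd (hhd a h) (by omega)
        rw [dhlBestLoop, if_pos]
        · apply bestLoop_keep
          intro b hb hbin
          rcases hmin b (List.mem_cons_of_mem _ hb) hbin with rfl | hlt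
          · exact absurd hb hna
          · rcases hlt with h | ⟨h, _⟩ <;> omega
        · cases acc with
          | none => rw [hin]; rfl
          | some c =>
              have := hacc c rfl
              simp only [Bool.and_eq_true, dhlBeats, decide_eq_true_eq]
              exact ⟨hin, this⟩
      · -- head is not the winner: whatever it does to acc stays shorter than a
        have hidx : dhlIdx x.1 < dhlIdx a.1 := hhd a hat
        have hxa : x ≠ a := fun h => by subst h; omega
        have hxlen : PySem.Str.isIn x.1 lower = true → PySem.Str.len x.1 < PySem.Str.len a.1 := by
          intro hxin
          rcases hmin x List.mem_cons_self hxin with h | h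
          · exact absurd h hxa
          · rcases h with h | ⟨h, h2⟩
            · exact h
            · omega
        rw [dhlBestLoop]
        apply ih _ a htl hat hin (fun b hb => hmin b (List.mem_cons_of_mem _ hb))
        intro c hc
        split at hc
        · rename_i hcond
          simp only [Bool.and_eq_true] at hcond
          have hxin : PySem.Str.isIn x.1 lower = true := hcond.1
          injection hc with hc'
          subst hc'
          exact hxlen hxin
        · exact hacc c hc

-- both loops compute the same final answer, for any haystack `lower`
theorem dhl_tail_eq (lower : String) :
    (match dhlSortedLoop (PySem.List.sorted dhlMap.keys (fun k => PySem.Str.len k) true) lower with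
     | some v => v
     | none =>
         if dhlDeliveredMarkers.any (fun m => PySem.Str.isIn m lower) then
           if !(dhlNegTokens.any (fun t => PySem.Str.isIn t lower)) then "Delivered"
           else "In Transit"
         else "In Transit")
    = (match dhlBestLoop dhlMap.items lower none with
       | some b => b.2
       | none => "In Transit") := by
  rw [dhl_sort_eq, dhlSortedLoop_eq_find]
  have hitems : dhlMap.items = dhlPairs := rfl
  cases hfind : dhlSortedKeys.find? (fun k => PySem.Str.isIn k lower) with
  | none =>
      have hnone := List.find?_eq_none.mp hfind
      have hno : ∀ b ∈ dhlPairs, PySem.Str.isIn b.1 lower = false := by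
        intro b hb
        have : b.1 ∈ dhlSortedKeys :=
          dhl_sorted_perm.mem_iff.mpr (List.mem_map_of_mem hb)
        simpa using hnone _ this
      rw [hitems, bestLoop_none lower dhlPairs none hno]
      have hmark : dhlDeliveredMarkers.any (fun m => PySem.Str.isIn m lower) = false := by
        rw [List.any_eq_false]
        intro m hm
        have hmem : m ∈ dhlSortedKeys := by
          fin_cases hm <;> decide
        simpa using hnone m hmem
      simp only [Option.map_none]
      rw [hmark]
      simp
  | some k =>
      rcases find_sorted_min _ _ dhl_sorted_pairwise k hfind with ⟨hpk, hks, hmin⟩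
      have hkL : k ∈ dhlPairs.map Prod.fst := dhl_sorted_perm.mem_iff.mp hks
      rcases List.mem_map.mp hkL with ⟨a, haL, hak⟩
      have hmemi : (a.1, a.2) ∈ dhlMap.items := by
        rw [hitems, Prod.mk.eta]; exact haL
      have hget : dhlMap.get? a.1 = some a.2 :=
        PySem.Dict.get?_of_mem_items dhlMap hmemi dhl_keys_nodup
      have hbest : dhlBestLoop dhlPairs lower none = some a := by
        apply bestLoop_min lower dhlPairs none a dhl_pairs_pairwise_idx haL
        · rw [hak]; exact hpk
        · intro b hb hbin
          have hbS : b.1 ∈ dhlSortedKeys :=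
            dhl_sorted_perm.mem_iff.mpr (List.mem_map_of_mem hb)
          rcases hmin b.1 hbS hbin with hbk | hlt
          · left
            have hmemb : (b.1, b.2) ∈ dhlMap.items := by
              rw [hitems, Prod.mk.eta]; exact hb
            have hgetb : dhlMap.get? b.1 = some b.2 :=
              PySem.Dict.get?_of_mem_items dhlMap hmemb dhl_keys_nodup
            rw [hbk, ← hak, hget] at hgetb
            injection hgetb with hv
            exact Prod.ext (by rw [hbk, hak]) (hv.symm)
          · right; rw [hak]; exact hlt
        · intro c hc; cases hc
      rw [hitems, hbest]
      simp only [Option.map_some]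
      rw [← hak]
      rw [PySem.Dict.getD_of_get?_eq_some dhlMap "" hget]

-- the two ports agree: the shared guards are identical, the tails by dhl_tail_eq
theorem dhl_ports_eq (lower code : String) :
    (if code = "WC" then "Out for Delivery"
     else if code = "OK" then "Delivered"
     else if dhlMap.contains lower then dhlMap.getD lower ""
     else
       match dhlSortedLoop (PySem.List.sorted dhlMap.keys (fun k => PySem.Str.len k) true) lower with
       | some v => v
       | none =>
           if dhlDeliveredMarkers.any (fun m => PySem.Str.isIn m lower) then
             if !(dhlNegTokens.any (fun t => PySem.Str.isIn t lower)) then "Delivered"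
             else "In Transit"
           else "In Transit")
    = (if code = "WC" then "Out for Delivery"
       else if code = "OK" then "Delivered"
       else if dhlMap.contains lower then dhlMap.getD lower ""
       else
         match dhlBestLoop dhlMap.items lower none with
         | some b => b.2
         | none => "In Transit") := by
  by_cases h1 : code = "WC"
  · rw [if_pos h1, if_pos h1]
  · rw [if_neg h1, if_neg h1]
    by_cases h2 : code = "OK"
    · rw [if_pos h2, if_pos h2]
    · rw [if_neg h2, if_neg h2]
      by_cases h3 : dhlMap.contains lower = true
      · rw [if_pos h3, if_pos h3]
      · rw [if_neg h3, if_neg h3]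
        exact dhl_tail_eq lower

-- ===== VERDICT (by name: the statement is the Claim_ definition above) =====
theorem map_dhl_status_spec : Claim_equal_map_dhl_status := by
  intro status_str event_code _
  show map_dhl_status status_str event_code = map_dhl_status_alt status_str event_code
  exact dhl_ports_eq (PySem.Str.strip (PySem.Str.lower status_str))
    (PySem.Str.strip (PySem.Str.upper (event_code.getD "")))
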